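-- pv_equiv track=rewrite | github.com/ewolden/adventofcode | 2024/2/2b.py | check_saftey
-- ===== SOURCE A (Python) =====
-- def check_saftey(nums, level_removed=False):
--     previous_num = 0
--     increasing = True
--     for idx, current_num in enumerate(nums):
--         if idx == 0:
--             previous_num = current_num
--             continue
--
--         if not (abs(previous_num - current_num) <= 3 and abs(previous_num - current_num) >= 1):
--             if level_removed:
--                 return False
--             else:
--                 safe_with_one_level_removed = []
--                 for i in range(len(nums)):
--                     safe_with_one_level_removed.append(check_saftey(nums[:i] + nums[i+1:], True))
--                 for safe in safe_with_one_level_removed: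
--                     if safe:
--                         return True
--                 return False
--
--         if idx == 1:
--             increasing = True if previous_num < current_num else False
--             previous_num = current_num
--             continue
--
--         if not ((increasing and previous_num < current_num) or\
--             (not increasing and previous_num > current_num)):
--             if level_removed:
--                 return False
--             else:
--                 safe_with_one_level_removed = []
--                 for i in range(len(nums)):
--                     safe_with_one_level_removed.append(check_saftey(nums[:i] + nums[i+1:], True))
--                 for safe in safe_with_one_level_removed:
--                     if safe:
--                         return True
--                 return False
--
--         previous_num = current_num
--     return True
-- ===== SOURCE B (Python) =====
-- def check_saftey(nums, level_removed=False):
--     def safe(xs):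
--         n = len(xs)
--         return (all(1 <= xs[k + 1] - xs[k] <= 3 for k in range(n - 1))
--                 or all(-3 <= xs[k + 1] - xs[k] <= -1 for k in range(n - 1)))
--     if safe(nums):
--         return True
--     if level_removed:
--         return False
--     return any(safe(nums[:i] + nums[i + 1:]) for i in range(len(nums)))
-- ===== Notes on version B (the rewrite author's own statement) =====
-- stated objective: alternative
-- what changed: A's stateful loop (index, previous value, direction flag) with a recursive self-call per removal is replaced by a declarative check on the adjacent-difference list (all diffs in [1,3] or all in [-3,-1]) applied to the list and, if needed, to each one-element removal.
import Mathlib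
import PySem

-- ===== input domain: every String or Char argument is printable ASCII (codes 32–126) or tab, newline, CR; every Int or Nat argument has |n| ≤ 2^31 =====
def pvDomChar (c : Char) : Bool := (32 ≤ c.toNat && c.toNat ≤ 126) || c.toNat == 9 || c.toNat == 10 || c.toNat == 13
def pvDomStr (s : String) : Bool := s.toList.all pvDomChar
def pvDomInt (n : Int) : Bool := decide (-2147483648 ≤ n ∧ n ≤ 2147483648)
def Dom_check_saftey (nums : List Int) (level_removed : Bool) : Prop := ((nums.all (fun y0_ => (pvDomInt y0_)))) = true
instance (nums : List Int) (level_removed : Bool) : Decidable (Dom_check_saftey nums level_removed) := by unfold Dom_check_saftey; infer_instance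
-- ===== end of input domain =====

-- B replaces A's stateful index/direction loop and recursive self-call by a declarative
-- check over the list of adjacent differences (all in [1,3] or all in [-3,-1]); alternative
-- decomposition, same cost.

-- ===== PORT A =====
-- A's for-loop over enumerate(nums): idx, previous_num and increasing are the loop state;
-- returns true when the loop completes, false at the first violation (both violation sites
-- of A trigger the identical removal scan, so the loop reports only "violation").
def checkLoopA (idx : Nat) (prev : Int) (inc : Bool) : List Int → Bool
  | [] => true
  | c :: rest =>
    if idx = 0 then checkLoopA 1 c inc rest
    else if ¬((prev - c).natAbs ≤ 3 ∧ 1 ≤ (prev - c).natAbs) then false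
    else if idx = 1 then checkLoopA 2 c (decide (prev < c)) rest
    else if ¬((inc ∧ prev < c) ∨ (¬inc ∧ prev > c)) then false
    else checkLoopA (idx + 1) c inc rest

def check_saftey (nums : List Int) (level_removed : Bool) : Bool :=
  if checkLoopA 0 0 true nums then true
  else if level_removed then false
  else
    -- safe_with_one_level_removed = [check_saftey(nums[:i]+nums[i+1:], True) for i in range(len(nums))]
    let safe_with_one_level_removed :=
      (List.range nums.length).attach.map
        (fun i => check_saftey (nums.take i.1 ++ nums.drop (i.1 + 1)) true)
    safe_with_one_level_removed.any id
termination_by nums.length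
decreasing_by
  have hi := i.2
  simp only [List.mem_range] at hi
  simp [List.length_take, List.length_drop]
  omega

-- ===== PORT B =====
def diffsB : List Int → List Int
  | [] => []
  | [_] => []
  | a :: b :: rest => (b - a) :: diffsB (b :: rest)

def safeB (xs : List Int) : Bool :=
  (diffsB xs).all (fun d => 1 ≤ d ∧ d ≤ 3) || (diffsB xs).all (fun d => -3 ≤ d ∧ d ≤ -1)

def check_saftey_alt (nums : List Int) (level_removed : Bool) : Bool :=
  if safeB nums then true
  else if level_removed then false
  else (List.range nums.length).any (fun i => safeB (nums.take i ++ nums.drop (i + 1)))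

-- ===== PRECONDITION & SPEC =====
def Spec_check_saftey (nums : List Int) (level_removed : Bool) (out : Bool) : Prop := out = check_saftey_alt nums level_removed
instance (nums : List Int) (level_removed : Bool) (out : Bool) : Decidable (Spec_check_saftey nums level_removed out) := by unfold Spec_check_saftey; infer_instance

-- ===== CLAIM (what is proved, stated in full; the proofs are below) =====
def Claim_equal_check_saftey : Prop := ∀ (nums : List Int) (level_removed : Bool), Dom_check_saftey nums level_removed → Spec_check_saftey nums level_removed (check_saftey nums level_removed)

-- ===== LEMMAS AND PROOFS =====

-- proof-only helper: the steady-state (idx ≥ 2) body of A's loop, without the index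
def chainA (prev : Int) (inc : Bool) : List Int → Bool
  | [] => true
  | c :: r =>
    if ((prev - c).natAbs ≤ 3 ∧ 1 ≤ (prev - c).natAbs) ∧
       ((inc = true ∧ prev < c) ∨ (¬inc = true ∧ prev > c)) then chainA c inc r
    else false

theorem checkLoopA_ge2 (rest : List Int) : ∀ (i : Nat) (prev : Int) (inc : Bool), 2 ≤ i →
    checkLoopA i prev inc rest = chainA prev inc rest := by
  induction rest with
  | nil => intros; rfl
  | cons c r ih =>
    intro i prev inc hi
    rw [checkLoopA, chainA]
    rw [if_neg (by omega : ¬ i = 0)]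
    by_cases hab : ((prev - c).natAbs ≤ 3 ∧ 1 ≤ (prev - c).natAbs)
    · rw [if_neg (not_not_intro hab), if_neg (by omega : ¬ i = 1)]
      by_cases hdir : ((inc = true ∧ prev < c) ∨ (¬inc = true ∧ prev > c))
      · rw [if_neg (not_not_intro hdir), if_pos ⟨hab, hdir⟩]
        exact ih (i + 1) c inc (by omega)
      · rw [if_pos hdir, if_neg (by exact fun h => hdir h.2)]
    · rw [if_pos hab, if_neg (by exact fun h => hab h.1)]

theorem chainA_inc (rest : List Int) : ∀ (prev : Int),
    chainA prev true rest = (diffsB (prev :: rest)).all (fun d => 1 ≤ d ∧ d ≤ 3) := by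
  induction rest with
  | nil => intro prev; rfl
  | cons c r ih =>
    intro prev
    rw [chainA]
    show _ = ((c - prev) :: diffsB (c :: r)).all (fun d => 1 ≤ d ∧ d ≤ 3)
    rw [List.all_cons]
    by_cases hd : (1 ≤ c - prev ∧ c - prev ≤ 3)
    · rw [if_pos ⟨by omega, Or.inl ⟨rfl, by omega⟩⟩, ih c]
      simp [hd]
    · rw [if_neg (by
        rintro ⟨⟨h1, h2⟩, h3 | h3⟩
        · exact hd ⟨by omega, by omega⟩
        · simp at h3)]
      rw [decide_eq_false hd]
      simp

theorem chainA_dec (rest : List Int) : ∀ (prev : Int),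
    chainA prev false rest = (diffsB (prev :: rest)).all (fun d => -3 ≤ d ∧ d ≤ -1) := by
  induction rest with
  | nil => intro prev; rfl
  | cons c r ih =>
    intro prev
    rw [chainA]
    show _ = ((c - prev) :: diffsB (c :: r)).all (fun d => -3 ≤ d ∧ d ≤ -1)
    rw [List.all_cons]
    by_cases hd : (-3 ≤ c - prev ∧ c - prev ≤ -1)
    · rw [if_pos ⟨by omega, Or.inr ⟨by simp, by omega⟩⟩, ih c]
      simp [hd]
    · rw [if_neg (by
        rintro ⟨⟨h1, h2⟩, h3 | h3⟩
        · simp at h3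
        · exact hd ⟨by omega, by omega⟩)]
      rw [decide_eq_false hd]
      simp

-- the full loop from idx = 0 equals B's diff-list check
theorem loopA_eq_safeB (nums : List Int) : checkLoopA 0 0 true nums = safeB nums := by
  match nums with
  | [] => rfl
  | [a] => rfl
  | a :: b :: rest =>
    show checkLoopA 1 a true (b :: rest) = safeB (a :: b :: rest)
    rw [checkLoopA]
    rw [if_neg (by omega : ¬ (1:Nat) = 0)]
    have hsafe : safeB (a :: b :: rest) =
        ((decide (1 ≤ b - a ∧ b - a ≤ 3) && (diffsB (b :: rest)).all (fun d => 1 ≤ d ∧ d ≤ 3)) ||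
         (decide (-3 ≤ b - a ∧ b - a ≤ -1) && (diffsB (b :: rest)).all (fun d => -3 ≤ d ∧ d ≤ -1))) := by
      rw [safeB]
      show (((b - a) :: diffsB (b :: rest)).all _ || ((b - a) :: diffsB (b :: rest)).all _) = _
      rw [List.all_cons, List.all_cons]
    rw [hsafe]
    by_cases hab : ((a - b).natAbs ≤ 3 ∧ 1 ≤ (a - b).natAbs)
    · rw [if_neg (not_not_intro hab), if_pos rfl]
      rw [checkLoopA_ge2 rest 2 b (decide (a < b)) (by omega)]
      rcases lt_trichotomy a b with hlt | heq | hgt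
      · rw [decide_eq_true hlt, chainA_inc]
        have h1 : decide (1 ≤ b - a ∧ b - a ≤ 3) = true := by rw [decide_eq_true_eq]; omega
        have h2 : decide (-3 ≤ b - a ∧ b - a ≤ -1) = false := by rw [decide_eq_false_iff_not]; omega
        rw [h1, h2]
        simp
      · omega
      · have : decide (a < b) = false := by rw [decide_eq_false_iff_not]; omega
        rw [this, chainA_dec]
        have h1 : decide (1 ≤ b - a ∧ b - a ≤ 3) = false := by rw [decide_eq_false_iff_not]; omega
        have h2 : decide (-3 ≤ b - a ∧ b - a ≤ -1) = true := by rw [decide_eq_true_eq]; omega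
        rw [h1, h2]
        simp
    · rw [if_pos hab]
      have h1 : decide (1 ≤ b - a ∧ b - a ≤ 3) = false := by rw [decide_eq_false_iff_not]; omega
      have h2 : decide (-3 ≤ b - a ∧ b - a ≤ -1) = false := by rw [decide_eq_false_iff_not]; omega
      rw [h1, h2]
      simp

theorem check_saftey_true_eq (l : List Int) : check_saftey l true = safeB l := by
  rw [check_saftey, loopA_eq_safeB]
  by_cases h : safeB l = true
  · simp [h]
  · simp [h]

theorem check_saftey_eq_alt (nums : List Int) (level_removed : Bool) :
    check_saftey nums level_removed = check_saftey_alt nums level_removed := by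
  rw [check_saftey, check_saftey_alt, loopA_eq_safeB]
  by_cases hs : safeB nums = true
  · simp [hs]
  · simp only [hs, if_false, Bool.false_eq_true]
    cases level_removed with
    | true => rfl
    | false =>
      simp only [if_false, Bool.false_eq_true]
      rw [List.any_map]
      rw [List.any_eq, List.any_eq, decide_eq_decide]
      simp only [List.mem_attach, true_and, Function.comp, id_eq]
      constructor
      · rintro ⟨i, h⟩
        exact ⟨i.1, i.2, by rwa [check_saftey_true_eq] at h⟩
      · rintro ⟨i, hi, h⟩
        exact ⟨⟨i, hi⟩, by rwa [check_saftey_true_eq]⟩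

-- ===== VERDICT (by name: the statement is the Claim_ definition above) =====
theorem check_saftey_spec : Claim_equal_check_saftey := by
  intro nums level_removed _
  unfold Spec_check_saftey
  exact check_saftey_eq_alt nums level_removed
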